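-- pv_equiv track=rewrite | github.com/AnMunSR/StudyPython | BaiTapXuLyList/Bai71.py | viTriChuoiCoNhieuTuNhat
-- ===== SOURCE A (Python) =====
-- def viTriChuoiCoNhieuTuNhat(L, n):
--     pos = 0
--     result = L[0].split()
--     temp = len(result)
--     for i in range(1, n):
--         result = L[i].split()
--         if temp < len(result):
--             temp = len(result)
--             pos = i
--     return pos
-- ===== SOURCE B (Python) =====
-- def viTriChuoiCoNhieuTuNhat(L, n):
--     counts = [len(L[i].split()) for i in range(max(1, n))]
--     return counts.index(max(counts))
-- ===== Notes on version B (the rewrite author's own statement) =====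
-- stated objective: simpler
-- what changed: A's single running-max loop with pos/temp state is replaced by building the word-count table once and returning counts.index(max(counts)), using max(1, n) so that n<=1 keeps A's behaviour (only L[0] is read).
import Mathlib
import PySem

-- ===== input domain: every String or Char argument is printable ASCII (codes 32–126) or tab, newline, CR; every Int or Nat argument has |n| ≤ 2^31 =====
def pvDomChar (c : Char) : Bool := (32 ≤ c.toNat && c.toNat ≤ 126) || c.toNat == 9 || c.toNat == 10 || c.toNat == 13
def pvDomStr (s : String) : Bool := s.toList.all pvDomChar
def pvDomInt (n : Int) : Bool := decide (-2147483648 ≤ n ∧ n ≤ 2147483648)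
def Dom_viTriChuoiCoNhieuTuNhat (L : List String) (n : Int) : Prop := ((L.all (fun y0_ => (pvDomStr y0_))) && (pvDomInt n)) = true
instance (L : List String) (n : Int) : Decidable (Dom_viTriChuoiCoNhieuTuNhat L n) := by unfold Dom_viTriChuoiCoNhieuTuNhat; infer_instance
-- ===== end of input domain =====

-- B replaces A's single running-max loop by a counts table plus Python's max/.index (simpler decomposition; same cost).

-- len(L[i].split()) — the word count both Pythons compute at index i
def pvWc (L : List String) (i : Int) : Int :=
  ((PySem.Str.split₀ ((PySem.List.pyGet? L i).getD "")).length : Int)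

-- ===== PORT A =====
def viTriChuoiCoNhieuTuNhat (L : List String) (n : Int) : Int :=
  let temp := pvWc L 0
  ((PySem.List.pyRange 1 n 1).foldl
      (fun (st : Int × Int) i => if st.2 < pvWc L i then (i, pvWc L i) else st)
      ((0 : Int), temp)).1

-- ===== PORT B =====
-- counts.index(max(counts))
def pvIndexMax (counts : List Int) : Int :=
  match PySem.List.max? counts (fun x => x) with
  | some m => (((PySem.List.index? counts m).getD 0 : Nat) : Int)
  | none => 0   -- unreachable: counts is nonempty

def viTriChuoiCoNhieuTuNhat_alt (L : List String) (n : Int) : Int :=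
  pvIndexMax ((PySem.List.pyRange 0 (max 1 n) 1).map (pvWc L))

-- ===== PRECONDITION & SPEC =====
-- Pre_ excludes exactly the inputs where Python A raises IndexError: empty L (L[0]) or n > len(L).
def Pre_viTriChuoiCoNhieuTuNhat (L : List String) (n : Int) : Prop := L ≠ [] ∧ n ≤ (L.length : Int)
instance (L : List String) (n : Int) : Decidable (Pre_viTriChuoiCoNhieuTuNhat L n) := by unfold Pre_viTriChuoiCoNhieuTuNhat; infer_instance
def pvWitness_viTriChuoiCoNhieuTuNhat : List String × Int := (["a b", "c d e", "f"], 3)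

def Spec_viTriChuoiCoNhieuTuNhat (L : List String) (n : Int) (out : Int) : Prop := out = viTriChuoiCoNhieuTuNhat_alt L n
instance (L : List String) (n : Int) (out : Int) : Decidable (Spec_viTriChuoiCoNhieuTuNhat L n out) := by unfold Spec_viTriChuoiCoNhieuTuNhat; infer_instance

-- ===== CLAIM (what is proved, stated in full; the proofs are below) =====
def Claim_equal_viTriChuoiCoNhieuTuNhat : Prop := ∀ (L : List String) (n : Int), Dom_viTriChuoiCoNhieuTuNhat L n → Pre_viTriChuoiCoNhieuTuNhat L n → Spec_viTriChuoiCoNhieuTuNhat L n (viTriChuoiCoNhieuTuNhat L n)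

-- ===== LEMMAS AND PROOFS =====

-- A's loop state after processing range(1, n), for an arbitrary per-index count f
def pvLoop (f : Int → Int) (n : Int) : Int × Int :=
  (PySem.List.pyRange 1 n 1).foldl
    (fun (st : Int × Int) i => if st.2 < f i then (i, f i) else st) ((0 : Int), f 0)

-- loop invariant: the state is (first index of the running max, running max) over the counts table
lemma pvLoop_inv (f : Int → Int) (m : Nat) :
    (∀ x ∈ (PySem.List.pyRange 0 (1 + (m : Int)) 1).map f, x ≤ (pvLoop f (1 + m)).2) ∧
    PySem.List.index? ((PySem.List.pyRange 0 (1 + (m : Int)) 1).map f) (pvLoop f (1 + m)).2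
      = some (pvLoop f (1 + m)).1.toNat ∧
    0 ≤ (pvLoop f (1 + m)).1 ∧
    (pvLoop f (1 + m)).2 ∈ (PySem.List.pyRange 0 (1 + (m : Int)) 1).map f := by
  induction m with
  | zero =>
      have h01 : PySem.List.pyRange 0 (1 + ((0 : Nat) : Int)) 1 = [0] := by
        simpa using PySem.List.pyRange_one_singleton 0
      have hL : pvLoop f (1 + ((0 : Nat) : Int)) = ((0 : Int), f 0) := by
        simp [pvLoop, PySem.List.pyRange_one_eq_nil]
      rw [h01, hL]
      refine ⟨by simp, ?_, le_refl _, by simp⟩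
      simp [PySem.List.index?_eq_idxOf?, List.idxOf?]
  | succ k ih =>
      obtain ⟨hmax, hidx, hpos, hmem⟩ := ih
      have h1 : (1 : Int) + (k + 1 : Nat) = (1 + (k : Nat)) + 1 := by push_cast; ring
      have hstep : pvLoop f (1 + (k + 1 : Nat)) =
          (fun (st : Int × Int) i => if st.2 < f i then (i, f i) else st)
            (pvLoop f (1 + k)) (1 + (k : Int)) := by
        rw [pvLoop, h1, PySem.List.pyRange_one_succ_right (by omega),
          List.foldl_append]
        rfl
      have hc : (PySem.List.pyRange 0 ((1 : Int) + (k + 1 : Nat)) 1).map f =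
          (PySem.List.pyRange 0 (1 + (k : Int)) 1).map f ++ [f (1 + (k : Int))] := by
        rw [h1, PySem.List.pyRange_one_succ_right (by omega)]
        simp
      rw [hstep, hc]
      by_cases hlt : (pvLoop f (1 + k)).2 < f (1 + (k : Int))
      · simp only [hlt, if_pos]
        have hlen : ((PySem.List.pyRange 0 (1 + (k : Int)) 1).map f).length = k + 1 := by
          simp [PySem.List.length_pyRange_one]; omega
        have hnotin : f (1 + (k : Int)) ∉ (PySem.List.pyRange 0 (1 + (k : Int)) 1).map f := by
          intro hmem'
          exact absurd (hmax _ hmem') (by omega)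
        refine ⟨?_, ?_, by omega, by simp⟩
        · intro x hx
          rcases List.mem_append.mp hx with h | h
          · exact le_of_lt (lt_of_le_of_lt (hmax _ h) hlt)
          · simp at h; omega
        · rw [PySem.List.index?_append_singleton_self _ _ hnotin, hlen]
          congr 1
          omega
      · simp only [hlt, if_neg, not_false_iff]
        refine ⟨?_, ?_, hpos, List.mem_append_left _ hmem⟩
        · intro x hx
          rcases List.mem_append.mp hx with h | h
          · exact hmax _ h
          · simp at h; omega
        · rw [PySem.List.index?_append_of_mem _ hmem]
          exact hidx

-- the two ports agree for every L and n
lemma pv_agree (L : List String) (n : Int) :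
    viTriChuoiCoNhieuTuNhat L n = viTriChuoiCoNhieuTuNhat_alt L n := by
  by_cases hn : n ≤ 1
  · have hr : PySem.List.pyRange 1 n 1 = [] := PySem.List.pyRange_one_eq_nil hn
    have hm : max 1 n = 1 := by omega
    have h01 : PySem.List.pyRange 0 (1 : Int) 1 = [0] := by
      simpa using PySem.List.pyRange_one_singleton 0
    simp [viTriChuoiCoNhieuTuNhat, viTriChuoiCoNhieuTuNhat_alt, pvIndexMax, hr, hm, h01,
      PySem.List.max?, PySem.List.index?_eq_idxOf?, List.idxOf?]
  · have hm : max 1 n = n := by omega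
    obtain ⟨m, hmeq⟩ : ∃ m : Nat, n = 1 + (m : Int) := ⟨(n - 1).toNat, by omega⟩
    subst hmeq
    obtain ⟨hmax, hidx, hpos, hmem⟩ := pvLoop_inv (pvWc L) m
    set c := (PySem.List.pyRange 0 (1 + (m : Int)) 1).map (pvWc L) with hc
    have hA : viTriChuoiCoNhieuTuNhat L (1 + m) = (pvLoop (pvWc L) (1 + m)).1 := rfl
    obtain ⟨mx, hmx⟩ : ∃ mx, PySem.List.max? c (fun x => x) = some mx := by
      cases h : PySem.List.max? c (fun x => x) with
      | none =>
          rw [PySem.List.max?_eq_none_iff] at h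
          have h0 : (0 : Int) ∈ PySem.List.pyRange 0 (1 + (m : Int)) 1 := by
            rw [PySem.List.mem_pyRange_one]; omega
          have : pvWc L 0 ∈ c := List.mem_map_of_mem h0
          rw [h] at this; simp at this
      | some mx => exact ⟨mx, rfl⟩
    have heq : mx = (pvLoop (pvWc L) (1 + m)).2 :=
      le_antisymm (hmax _ (PySem.List.max?_mem hmx)) (PySem.List.max?_isMax hmx _ hmem)
    rw [hA]
    unfold viTriChuoiCoNhieuTuNhat_alt pvIndexMax
    rw [hm, ← hc, hmx, heq]
    dsimp only
    rw [hidx]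
    simp
    omega

-- ===== VERDICT (by name: the statement is the Claim_ definition above) =====
theorem viTriChuoiCoNhieuTuNhat_spec : Claim_equal_viTriChuoiCoNhieuTuNhat := by
  intro L n _ _
  unfold Spec_viTriChuoiCoNhieuTuNhat
  exact pv_agree L n
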